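-- pv_equiv track=rewrite | github.com/mgood/jprops | jprops.py | _split_key_value
-- ===== SOURCE A (Python) =====
-- import string
--
-- _KEY_TERMINATORS_EXPLICIT = '=:'
--
-- _KEY_TERMINATORS = _KEY_TERMINATORS_EXPLICIT + string.whitespace
--
-- def _split_key_value(line):
--   escaped = False
--   key_buf = []
--
--   for idx, c in enumerate(line):
--     if not escaped and c in _KEY_TERMINATORS:
--       key_terminated_fully = c in _KEY_TERMINATORS_EXPLICIT
--       break
--
--     key_buf.append(c)
--     escaped = c == '\\'
--
--   else:
--     # no key terminator, key is full line & value is blank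
--     return line, ''
--
--   value = line[idx+1:].lstrip()
--   if not key_terminated_fully and value[:1] in _KEY_TERMINATORS_EXPLICIT:
--     value = value[1:].lstrip()
--
--   return ''.join(key_buf), value
-- ===== SOURCE B (Python) =====
-- import string
--
-- _TERMINATORS = '=:' + string.whitespace
--
--
-- def _split_key_value(line):
--   # A terminator counts unless the immediately preceding character is a backslash.
--   idx = next((i for i, c in enumerate(line)
--               if c in _TERMINATORS and (i == 0 or line[i - 1] != '\\')),
--              None)
--   if idx is None:
--     return line, ''
--
--   value = line[idx + 1:].lstrip()
--   if line[idx] not in '=:' and value[:1] in '=:':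
--     value = value[1:].lstrip()
--
--   return line[:idx], value
-- ===== Notes on version B (the rewrite author's own statement) =====
-- stated objective: simpler
-- what changed: Replaces A's stateful scan (escape flag + character-by-character key buffer) with a single lookbehind index search (first terminator whose preceding character is not a backslash) and plain slicing for the key.
import Mathlib
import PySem

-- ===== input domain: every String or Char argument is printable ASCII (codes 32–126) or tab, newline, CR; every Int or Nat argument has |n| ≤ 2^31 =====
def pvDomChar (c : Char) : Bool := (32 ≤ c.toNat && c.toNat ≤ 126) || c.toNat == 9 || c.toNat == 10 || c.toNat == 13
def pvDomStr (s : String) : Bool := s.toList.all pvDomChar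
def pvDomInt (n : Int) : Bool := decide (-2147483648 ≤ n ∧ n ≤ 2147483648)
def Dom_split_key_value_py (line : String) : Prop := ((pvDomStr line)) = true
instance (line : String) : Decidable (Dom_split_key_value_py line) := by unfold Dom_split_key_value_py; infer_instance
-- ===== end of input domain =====

-- B replaces A's escape-flag/key-buffer loop by a lookbehind index search plus slicing (simpler; same behaviour).

-- ===== PORT A =====
-- c in _KEY_TERMINATORS  ('=:' + string.whitespace)
def pvTermChar (c : Char) : Bool :=
  c == '=' || c == ':' || c == ' ' || c == '\t' || c == '\n' || c == '\r' ||
  c == '\x0b' || c == '\x0c'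

-- c in _KEY_TERMINATORS_EXPLICIT  ('=:')
def pvExplChar (c : Char) : Bool := c == '=' || c == ':'

-- A's for-loop: returns none on fall-through (no terminator), else (key_buf, key_terminated_fully, line[idx+1:])
def pvALoop : List Char → Bool → List Char → Option (List Char × Bool × List Char)
  | [], _, _ => none
  | c :: cs, escaped, keyBuf =>
    if !escaped && pvTermChar c then some (keyBuf, pvExplChar c, cs)
    else pvALoop cs (c == '\\') (keyBuf ++ [c])

def split_key_value_py (line : String) : String × String :=
  match pvALoop line.toList false [] with
  | none => (line, "")
  | some (keyBuf, keyTerminatedFully, rest) =>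
    let value := PySem.Chars.lstrip rest
    -- value[:1] in '=:' — note '' in '=:' is True in Python
    let value :=
      if !keyTerminatedFully &&
          (match value with | [] => true | c :: _ => pvExplChar c) then
        PySem.Chars.lstrip (value.drop 1)
      else value
    (String.ofList keyBuf, String.ofList value)

-- ===== PORT B =====
-- first index i with line[i] a terminator and (i == 0 or line[i-1] != '\\')
def pvBFind (l : List Char) (i : Nat) : Option Nat :=
  if h : i < l.length then
    if pvTermChar l[i] && (i == 0 || !(l.getD (i - 1) ' ' == '\\')) then some i
    else pvBFind l (i + 1)
  else none
termination_by l.length - i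

def split_key_value_py_alt (line : String) : String × String :=
  let l := line.toList
  match pvBFind l 0 with
  | none => (line, "")
  | some i =>
    let value := PySem.Chars.lstrip (l.drop (i + 1))
    let value :=
      if !pvExplChar (l.getD i ' ') &&
          (match value.head? with | none => true | some c => pvExplChar c) then
        PySem.Chars.lstrip (value.drop 1)
      else value
    (String.ofList (l.take i), String.ofList value)

-- ===== PRECONDITION & SPEC =====
def Spec_split_key_value_py (line : String) (out : String × String) : Prop := out = split_key_value_py_alt line
instance (line : String) (out : String × String) : Decidable (Spec_split_key_value_py line out) := by unfold Spec_split_key_value_py; infer_instance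

-- ===== CLAIM (what is proved, stated in full; the proofs are below) =====
def Claim_equal_split_key_value_py : Prop := ∀ (line : String), Dom_split_key_value_py line → Spec_split_key_value_py line (split_key_value_py line)

-- ===== LEMMAS AND PROOFS =====

lemma pvBFind_ge_fuel (l : List Char) (k : Nat) :
    ∀ i j, l.length - i ≤ k → pvBFind l i = some j → i ≤ j := by
  induction k with
  | zero =>
    intro i j hle h
    rw [pvBFind, dif_neg (by omega)] at h
    exact absurd h (by simp)
  | succ k ih =>
    intro i j hle h
    rw [pvBFind] at h
    split at h
    · split at h
      · exact le_of_eq (Option.some.inj h)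
      · exact Nat.le_of_succ_le (ih (i + 1) j (by omega) h)
    · exact absurd h (by simp)

lemma pvBFind_ge (l : List Char) (i j : Nat) (h : pvBFind l i = some j) : i ≤ j :=
  pvBFind_ge_fuel l (l.length - i) i j le_rfl h

lemma pvLoop_eq_find_fuel (l : List Char) (k : Nat) :
    ∀ i keyBuf, l.length - i ≤ k →
    pvALoop (l.drop i) (!(i == 0) && (l.getD (i - 1) ' ' == '\\')) keyBuf =
      match pvBFind l i with
      | none => none
      | some j => some (keyBuf ++ (l.drop i).take (j - i), pvExplChar (l.getD j ' '), l.drop (j + 1)) := by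
  have htauto : ∀ (a b c : Bool), (!(!a && b) && c) = (c && (a || !b)) := by decide
  induction k with
  | zero =>
    intro i keyBuf hle
    rw [List.drop_eq_nil_of_le (by omega), pvBFind, dif_neg (by omega)]
    rfl
  | succ k ih =>
    intro i keyBuf hle
    by_cases hlt : i < l.length
    · rw [List.drop_eq_getElem_cons hlt]
      rw [pvALoop, htauto, pvBFind, dif_pos hlt]
      by_cases hc : (pvTermChar l[i] && ((i == 0) || !(l.getD (i - 1) ' ' == '\\'))) = true
      · rw [if_pos hc, if_pos hc]
        simp [List.getD, List.getElem?_eq_getElem hlt]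
      · rw [if_neg hc, if_neg hc]
        have hesc : (l[i] == '\\') = (!(i + 1 == 0) && (l.getD (i + 1 - 1) ' ' == '\\')) := by
          simp [List.getD, List.getElem?_eq_getElem hlt]
        rw [hesc, ih (i + 1) (keyBuf ++ [l[i]]) (by omega)]
        cases hb : pvBFind l (i + 1) with
        | none => rfl
        | some j =>
          have hij : i + 1 ≤ j := pvBFind_ge l (i + 1) j hb
          have htake : (l.drop i).take (j - i) = l[i] :: (l.drop (i + 1)).take (j - (i + 1)) := by
            rw [List.drop_eq_getElem_cons hlt, show j - i = (j - (i + 1)) + 1 by omega]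
            rfl
          simp [htake]
    · rw [List.drop_eq_nil_of_le (by omega), pvBFind, dif_neg (by omega)]
      rfl

lemma pvLoop_eq_find (l : List Char) :
    pvALoop l false [] =
      match pvBFind l 0 with
      | none => none
      | some j => some (l.take j, pvExplChar (l.getD j ' '), l.drop (j + 1)) := by
  have h := pvLoop_eq_find_fuel l (l.length) 0 [] (by omega)
  simpa using h

-- ===== VERDICT (by name: the statement is the Claim_ definition above) =====
theorem split_key_value_py_spec : Claim_equal_split_key_value_py := by
  intro line _
  unfold Spec_split_key_value_py split_key_value_py split_key_value_py_alt
  rw [pvLoop_eq_find]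
  cases hb : pvBFind line.toList 0 with
  | none => simp only [hb]
  | some j =>
    simp only [hb]
    cases PySem.Chars.lstrip (List.drop (j + 1) line.toList) <;> rfl
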